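-- pv_equiv track=rewrite | github.com/viveksoorya/qc | qcqi-section-wise-booklets/code-to-rearrange-pages-for-printing.py | custom_page_order
-- ===== SOURCE A (Python) =====
-- def custom_page_order(n):
--     odds = [i for i in range(1, n+1) if i % 2 == 1]
--     evens = [i for i in range(1, n+1) if i % 2 == 0][::-1]  # descending
--     result = []
--     for o, e in zip(odds, evens):
--         result.extend([e, o])
--     # If odds or evens are of unequal length, add the remaining
--     if len(odds) > len(evens):
--         result.append(odds[-1])
--     elif len(evens) > len(odds):
--         result.append(evens[-1])
--     return result
-- ===== SOURCE B (Python) =====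
-- def custom_page_order(n):
--     m = n // 2
--     result = []
--     for k in range(m):
--         result += [2 * (m - k), 2 * k + 1]
--     if n % 2 == 1 and n > 0:
--         result.append(n)
--     return result
-- ===== Notes on version B (the rewrite author's own statement) =====
-- stated objective: simpler
-- what changed: B drops A's two filtered range comprehensions, the reversal, the zip-and-extend loop and the length-comparison patch-up, and instead emits each (even, odd) block in closed form from a single arithmetic loop over range(n//2), appending the leftover odd page n only for odd positive n.
import Mathlib
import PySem

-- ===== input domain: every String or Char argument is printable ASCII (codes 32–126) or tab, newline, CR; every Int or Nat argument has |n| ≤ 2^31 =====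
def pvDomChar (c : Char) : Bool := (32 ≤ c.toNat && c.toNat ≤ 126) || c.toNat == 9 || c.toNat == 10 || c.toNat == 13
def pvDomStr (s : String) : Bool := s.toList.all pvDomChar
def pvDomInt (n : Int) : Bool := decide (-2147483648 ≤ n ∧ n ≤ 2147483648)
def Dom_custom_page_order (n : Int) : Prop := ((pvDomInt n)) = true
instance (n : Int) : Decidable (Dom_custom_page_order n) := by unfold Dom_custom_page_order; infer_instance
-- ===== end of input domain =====

-- B replaces A's build-two-lists-zip-and-patch with a single arithmetic loop over range(n//2)
-- emitting each (even, odd) block in closed form (objective: simpler; return value only, no mutation).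

-- ===== PORT A =====
def custom_page_order (n : Int) : List Int :=
  let odds := (PySem.List.pyRange 1 (n+1) 1).filter (fun i => PySem.Int.mod i 2 == 1)
  let evens := ((PySem.List.pyRange 1 (n+1) 1).filter (fun i => PySem.Int.mod i 2 == 0))
  let evensDesc := (PySem.List.slice? evens none none (-1)).getD []   -- [::-1]
  let result := (odds.zip evensDesc).foldl (fun acc p => acc ++ [p.2, p.1]) []
  if odds.length > evensDesc.length then result ++ [PySem.List.pyGetD odds (-1) 0]   -- odds[-1], guarded nonempty
  else if evensDesc.length > odds.length then result ++ [PySem.List.pyGetD evensDesc (-1) 0]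
  else result

-- ===== PORT B =====
def custom_page_order_alt (n : Int) : List Int :=
  let m := PySem.Int.floordiv n 2
  let result := (PySem.List.pyRange 0 m 1).foldl (fun acc k => acc ++ [2*(m-k), 2*k+1]) []
  if PySem.Int.mod n 2 == 1 && decide (0 < n) then result ++ [n] else result

-- ===== PRECONDITION & SPEC =====
def Spec_custom_page_order (n : Int) (out : List Int) : Prop := out = custom_page_order_alt n
instance (n : Int) (out : List Int) : Decidable (Spec_custom_page_order n out) := by unfold Spec_custom_page_order; infer_instance

-- ===== CLAIM (what is proved, stated in full; the proofs are below) =====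
def Claim_equal_custom_page_order : Prop := ∀ (n : Int), Dom_custom_page_order n → Spec_custom_page_order n (custom_page_order n)

-- ===== LEMMAS AND PROOFS =====

-- Closed forms for A's odds and evens comprehensions over range(1, t+1).
theorem odds_evens_closed (t : Nat) :
    (((List.range t).map (fun k : Nat => (1:Int) + k)).filter (fun i => PySem.Int.mod i 2 == 1)
       = (List.range ((t+1)/2)).map (fun k : Nat => (2*(k:Int)+1)))
  ∧ (((List.range t).map (fun k : Nat => (1:Int) + k)).filter (fun i => PySem.Int.mod i 2 == 0)
       = (List.range (t/2)).map (fun k : Nat => (2*(k:Int)+2))) := by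
  induction t with
  | zero => simp
  | succ t ih =>
    obtain ⟨ho, he⟩ := ih
    rw [List.range_succ, List.map_append, List.filter_append, List.filter_append, ho, he]
    rcases Nat.even_or_odd t with ⟨j, hj⟩ | ⟨j, hj⟩
    · subst hj
      have hmod : (1 + ((j:Int) + j)) % 2 = 1 := by omega
      rw [show (j + j + 1 + 1)/2 = j + 1 from by omega,
          show (j + j + 1)/2 = j from by omega,
          show (j + j)/2 = j from by omega]
      constructor
      · rw [List.range_succ, List.map_append]
        congr 1
        simp [List.filter, hmod]
        omega
      · simp [List.filter, hmod]
    · subst hj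
      have hmod : (1 + (2 * (j:Int) + 1)) % 2 = 0 := by omega
      rw [show (2*j + 1 + 1 + 1)/2 = j + 1 from by omega,
          show (2*j + 1 + 1)/2 = j + 1 from by omega,
          show (2*j + 1)/2 = j from by omega]
      constructor
      · simp [List.filter, hmod]
      · rw [List.range_succ, List.map_append]
        congr 1
        simp [List.filter, hmod]
        omega

-- Reversing A's ascending evens gives the descending closed form.
theorem evens_reverse (M : Nat) :
    ((List.range M).map (fun k : Nat => (2*(k:Int)+2))).reverse
      = (List.range M).map (fun k : Nat => (2*(M:Int) - 2*k)) := by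
  induction M with
  | zero => simp
  | succ M ih =>
    conv_lhs => rw [List.range_succ, List.map_append, List.reverse_append, ih]
    conv_rhs => rw [List.range_succ_eq_map]
    simp [List.map_map, Function.comp]
    constructor
    · ring
    · intro a _
      ring_nf

theorem floordiv_nonpos (n : Int) (hn : n ≤ 0) : PySem.Int.floordiv n 2 ≤ 0 := by
  have h := PySem.Int.le_floordiv_iff_mul_le (a := n) (b := 2) (q := 1) (by omega)
  omega

-- ===== VERDICT (by name: the statement is the Claim_ definition above) =====
theorem custom_page_order_spec : Claim_equal_custom_page_order := by
  intro n _
  show custom_page_order n = custom_page_order_alt n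
  simp only [custom_page_order, custom_page_order_alt]
  rw [PySem.List.slice?_none_none_neg_one]
  by_cases hn : n ≤ 0
  · -- both sides are []
    rw [PySem.List.pyRange_one_eq_nil (by omega),
        PySem.List.pyRange_one_eq_nil (floordiv_nonpos n hn)]
    have : ¬ (0 < n) := by omega
    simp [this]
  · replace hn : 0 < n := by omega
    obtain ⟨t, rfl⟩ : ∃ t : Nat, n = (t : Int) := ⟨n.toNat, by omega⟩
    have hrange : PySem.List.pyRange 1 ((t:Int)+1) 1
        = (List.range t).map (fun k : Nat => (1:Int) + k) := by
      rw [PySem.List.pyRange_one, show ((t:Int)+1-1).toNat = t from by omega]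
    rw [hrange, (odds_evens_closed t).1, (odds_evens_closed t).2]
    simp only [Option.getD_some, evens_reverse]
    have hfd : PySem.Int.floordiv (t:Int) 2 = ((t/2 : Nat) : Int) := by
      exact_mod_cast PySem.Int.floordiv_natCast t 2
    have hmod : PySem.Int.mod (t:Int) 2 = ((t % 2 : Nat) : Int) := by
      exact_mod_cast PySem.Int.mod_natCast t 2
    have hbr : PySem.List.pyRange 0 (PySem.Int.floordiv (t:Int) 2) 1
        = (List.range (t/2)).map (fun k : Nat => ((k:Int))) := by
      rw [hfd, PySem.List.pyRange_one, show (((t/2 : Nat) : Int) - 0).toNat = t/2 from by omega]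
      simp
    rw [hbr]
    rcases Nat.even_or_odd t with ⟨j, hj⟩ | ⟨j, hj⟩
    · -- t even: equal lengths, no leftover element
      have hj' : t = 2*j := by omega
      subst hj'
      rw [show (2*j+1)/2 = j from by omega, show (2*j)/2 = j from by omega,
          List.zip_map']
      have hmod0 : ¬ (PySem.Int.mod ((2*j : Nat) : Int) 2 == 1 && decide (0 < ((2*j:Nat) : Int))) = true := by
        simp
      simp only [List.length_map, lt_self_iff_false, if_false, hmod0,
        PySem.List.foldl_append_eq_flatMap, List.nil_append, List.flatMap_map]
      apply List.flatMap_congr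
      intro k _
      simp
      ring
    · -- t odd: odds one longer; both sides append n
      subst hj
      rw [show (2*j+1+1)/2 = j+1 from by omega, show (2*j+1)/2 = j from by omega,
          List.range_succ, List.map_append,
          show List.map (fun k : Nat => (2*(k:Int)+1)) [j] = [2*(j:Int)+1] from by simp]
      have hlen : ((List.range j).map (fun k : Nat => (2*(k:Int)+1))).length
          = ((List.range j).map (fun k : Nat => (2*(j:Int) - 2*k))).length := by simp
      have hzip : (((List.range j).map (fun k : Nat => (2*(k:Int)+1))
            ++ [2*(j:Int)+1]).zip ((List.range j).map (fun k : Nat => (2*(j:Int) - 2*k))))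
          = ((List.range j).map (fun k : Nat => (2*(k:Int)+1))).zip
              ((List.range j).map (fun k : Nat => (2*(j:Int) - 2*k))) := by
        conv_lhs => rw [show ((List.range j).map (fun k : Nat => (2*(j:Int) - 2*k)))
          = ((List.range j).map (fun k : Nat => (2*(j:Int) - 2*k))) ++ [] from (List.append_nil _).symm]
        rw [List.zip_append hlen]
        simp
      rw [hzip, List.zip_map']
      have hlt : ((List.range j).map (fun k : Nat => (2*(j:Int) - 2*k))).length
          < (((List.range j).map (fun k : Nat => (2*(k:Int)+1))) ++ [2*(j:Int)+1]).length := by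
        simp
      have hmod1 : (PySem.Int.mod ((2*j+1 : Nat) : Int) 2 == 1 && decide (0 < ((2*j+1:Nat) : Int))) = true := by
        simp
      simp only [if_pos hlt, hmod1, if_true,
        PySem.List.foldl_append_eq_flatMap, List.nil_append, List.flatMap_map,
        PySem.List.pyGetD_neg_one_append_singleton]
      rw [hfd, show (2*j+1)/2 = j from by omega]
      refine congrArg₂ (· ++ ·) ?_ ?_
      · apply List.flatMap_congr
        intro k _
        simp
        ring
      · simp
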